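-- pv_equiv track=rewrite | github.com/jianke03/SmartQA | model.py | findNorm
-- ===== SOURCE A (Python) =====
-- def isNorm(c):
-- 	if c.find('n') >= 0 or c == 'r':
-- 		return True
-- 	return False
--
-- def findNorm(chara, start, d):
-- 	if d == 0:
-- 		ok = False
-- 		while start < len(chara) and start >= 0:
-- 			if isNorm(chara[start]):
-- 				ok = True
-- 			else:
-- 				if ok:
-- 					return start - 1
-- 			start += 1
-- 		if ok:
-- 			return start - 1
-- 		return len(chara)
-- 	elif d == 1:
-- 		while start >= 0 and start < len(chara):
-- 			if isNorm(chara[start]):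
-- 				return start
-- 			start -= 1
-- 		return -1
-- ===== SOURCE B (Python) =====
-- def isNorm(c):
-- 	if c.find('n') >= 0 or c == 'r':
-- 		return True
-- 	return False
--
-- def findNorm(chara, start, d):
-- 	n = len(chara)
-- 	norm = [isNorm(c) for c in chara]
-- 	if d == 0:
-- 		if start < 0 or start >= n:
-- 			return n
-- 		idxs = [i for i in range(start, n) if norm[i]]
-- 		if not idxs:
-- 			return n
-- 		end = idxs[0]
-- 		for i in idxs[1:]:
-- 			if i == end + 1:
-- 				end = i
-- 			else:
-- 				break
-- 		return end
-- 	elif d == 1: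
-- 		if start < 0 or start >= n:
-- 			return -1
-- 		idxs = [i for i in range(start + 1) if norm[i]]
-- 		return idxs[-1] if idxs else -1
-- ===== Notes on version B (the rewrite author's own statement) =====
-- stated objective: alternative
-- what changed: B precomputes a boolean norm table and materializes the list of norm indices with comprehensions, then answers d==0 by extending a consecutive run from the first index >= start and d==1 by taking the last norm index <= start, instead of A's flag-driven forward scan and early-exit backward scan.
-- outside the precondition, e.g. on findNorm(['n'], 0, 2): A returns None, B returns None
import Mathlib
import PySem

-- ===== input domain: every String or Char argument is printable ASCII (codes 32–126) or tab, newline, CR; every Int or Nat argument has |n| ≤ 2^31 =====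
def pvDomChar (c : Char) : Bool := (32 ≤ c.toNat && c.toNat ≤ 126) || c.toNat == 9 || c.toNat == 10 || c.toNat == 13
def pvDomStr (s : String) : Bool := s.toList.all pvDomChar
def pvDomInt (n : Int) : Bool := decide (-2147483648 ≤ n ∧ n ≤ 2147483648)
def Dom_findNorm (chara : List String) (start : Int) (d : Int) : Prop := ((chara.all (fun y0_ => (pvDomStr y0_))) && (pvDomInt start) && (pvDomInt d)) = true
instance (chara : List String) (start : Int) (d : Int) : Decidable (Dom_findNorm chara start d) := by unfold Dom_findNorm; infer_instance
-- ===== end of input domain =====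

-- B builds the list of norm indices up front (comprehensions) and answers from that table: run
-- extension for d==0, last qualifying index for d==1 — instead of A's flag-driven and early-exit scans.

-- ===== PORT A =====
-- isNorm(c): shared helper of both Pythons
def isNormP (c : String) : Bool :=
  if PySem.Str.find c "n" ≥ 0 then true else if c == "r" then true else false

-- A's d==0 while loop, state (start, ok)
def loopA0 (chara : List String) (start : Int) (ok : Bool) : Int :=
  if h : start < (chara.length : Int) ∧ 0 ≤ start then
    if isNormP (PySem.List.pyGetD chara start "") then
      loopA0 chara (start + 1) true
    else if ok then start - 1
    else loopA0 chara (start + 1) ok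
  else if ok then start - 1 else (chara.length : Int)
termination_by ((chara.length : Int) - start).toNat
decreasing_by all_goals omega

-- A's d==1 while loop
def loopA1 (chara : List String) (start : Int) : Int :=
  if h : 0 ≤ start ∧ start < (chara.length : Int) then
    if isNormP (PySem.List.pyGetD chara start "") then start
    else loopA1 chara (start - 1)
  else -1
termination_by (start + 1).toNat
decreasing_by omega

def findNorm (chara : List String) (start : Int) (d : Int) : Int :=
  if d = 0 then loopA0 chara start false
  else if d = 1 then loopA1 chara start
  else 0  -- Python returns None here (no int); excluded by Pre_findNorm

-- ===== PORT B =====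
-- the 'for i in idxs[1:]: if i == end+1: end = i else: break' loop
def runEnd (e : Int) : List Int → Int
  | [] => e
  | i :: rest => if i = e + 1 then runEnd i rest else e

-- n = len(chara) and norm = [isNorm(c) for c in chara] are inlined at their use sites
def findNorm_alt (chara : List String) (start : Int) (d : Int) : Int :=
  if d = 0 then
    if start < 0 ∨ start ≥ (chara.length : Int) then (chara.length : Int)
    else
      -- idxs = [i for i in range(start, n) if norm[i]]
      match (PySem.List.pyRange start (chara.length : Int) 1).filter
              (fun i => PySem.List.pyGetD (chara.map isNormP) i false) with
      | [] => (chara.length : Int)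
      | first :: rest => runEnd first rest
  else if d = 1 then
    if start < 0 ∨ start ≥ (chara.length : Int) then -1
    else
      -- idxs = [i for i in range(start+1) if norm[i]]; idxs[-1] if idxs else -1
      ((PySem.List.pyRange 0 (start + 1) 1).filter
          (fun i => PySem.List.pyGetD (chara.map isNormP) i false)).getLast?.getD (-1)
  else 0  -- Python returns None here (no int); excluded by Pre_findNorm

-- ===== PRECONDITION & SPEC =====
-- Pre_ excludes d ∉ {0, 1}, where A falls through and returns None instead of an int.
def Pre_findNorm (chara : List String) (start : Int) (d : Int) : Prop := d = 0 ∨ d = 1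
instance (chara : List String) (start : Int) (d : Int) : Decidable (Pre_findNorm chara start d) := by unfold Pre_findNorm; infer_instance

def pvWitness_findNorm : List String × Int × Int := (["x", "n", "r", "q"], 0, 0)

def Spec_findNorm (chara : List String) (start : Int) (d : Int) (out : Int) : Prop := out = findNorm_alt chara start d
instance (chara : List String) (start : Int) (d : Int) (out : Int) : Decidable (Spec_findNorm chara start d out) := by unfold Spec_findNorm; infer_instance

-- ===== CLAIM (what is proved, stated in full; the proofs are below) =====
def Claim_equal_findNorm : Prop := ∀ (chara : List String) (start : Int) (d : Int), Dom_findNorm chara start d → Pre_findNorm chara start d → Spec_findNorm chara start d (findNorm chara start d)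

-- ===== LEMMAS AND PROOFS =====

-- bridge: indexing the mapped boolean table = testing the string directly (isNormP "" = false)
theorem normAt_eq (chara : List String) (i : Int) :
    PySem.List.pyGetD (chara.map isNormP) i false = isNormP (PySem.List.pyGetD chara i "") := by
  have h := PySem.List.pyGetD_map isNormP chara i ""
  simpa [show isNormP "" = false from rfl] using h

-- the filtered norm-index list of the suffix starting at s
def idxsFrom (chara : List String) (s : Int) : List Int :=
  (PySem.List.pyRange s (chara.length : Int) 1).filter
    (fun i => isNormP (PySem.List.pyGetD chara i ""))

-- A's loop with ok = true = extend the run from s-1 through the index list of the suffix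
theorem loopA0_true_eq (chara : List String) :
    ∀ (k : Nat) (s : Int), ((chara.length : Int) - s).toNat ≤ k → 0 ≤ s →
      loopA0 chara s true = runEnd (s - 1) (idxsFrom chara s) := by
  intro k
  induction k with
  | zero =>
    intro s hk hs
    have hns : ¬ s < (chara.length : Int) := by omega
    rw [loopA0, idxsFrom, PySem.List.pyRange_one_eq_nil (by omega)]
    simp [hns, runEnd]
  | succ k ih =>
    intro s hk hs
    rw [loopA0, idxsFrom]
    by_cases hlt : s < (chara.length : Int)
    · rw [PySem.List.pyRange_one_cons hlt]
      simp only [hlt, hs, and_true, dif_pos, List.filter_cons]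
      by_cases hn : isNormP (PySem.List.pyGetD chara s "") = true
      · simp only [hn, if_pos]
        rw [ih (s + 1) (by omega) (by omega), idxsFrom,
          show s + 1 - 1 = s from by ring]
        show runEnd s _ = runEnd (s - 1) (s :: _)
        rw [runEnd, if_pos (by omega : s = s - 1 + 1)]
      · simp only [hn, Bool.false_eq_true, if_false]
        -- head of the remaining index list, if any, is ≥ s+1, so the run from s-1 does not extend
        cases hfe : idxsFrom chara (s + 1) with
        | nil =>
          rw [show (PySem.List.pyRange (s+1) (chara.length : Int) 1).filter
                (fun i => isNormP (PySem.List.pyGetD chara i "")) = idxsFrom chara (s+1) from rfl,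
             hfe]
          rfl
        | cons j rest =>
          have hj : j ∈ idxsFrom chara (s + 1) := by rw [hfe]; exact List.mem_cons_self
          have hj2 : j ∈ PySem.List.pyRange (s+1) (chara.length : Int) 1 :=
            (List.mem_filter.mp hj).1
          have hge : s + 1 ≤ j := ((PySem.List.mem_pyRange_one).mp hj2).1
          have hrw : (PySem.List.pyRange (s+1) (chara.length : Int) 1).filter
              (fun i => isNormP (PySem.List.pyGetD chara i "")) = j :: rest := hfe
          rw [hrw]
          show s - 1 = runEnd (s - 1) (j :: rest)
          rw [runEnd, if_neg (by omega : ¬ j = s - 1 + 1)]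
    · simp only [hlt, false_and, dif_neg, not_false_iff]
      rw [PySem.List.pyRange_one_eq_nil (by omega)]
      simp [runEnd]

-- A's loop with ok = false = B's match on the norm-index list of the suffix
theorem loopA0_false_eq (chara : List String) :
    ∀ (k : Nat) (s : Int), ((chara.length : Int) - s).toNat ≤ k → 0 ≤ s →
      loopA0 chara s false =
        (match idxsFrom chara s with
         | [] => (chara.length : Int)
         | first :: rest => runEnd first rest) := by
  intro k
  induction k with
  | zero =>
    intro s hk hs
    have hns : ¬ s < (chara.length : Int) := by omega
    rw [loopA0, idxsFrom, PySem.List.pyRange_one_eq_nil (by omega)]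
    simp [hns]
  | succ k ih =>
    intro s hk hs
    rw [loopA0, idxsFrom]
    by_cases hlt : s < (chara.length : Int)
    · rw [PySem.List.pyRange_one_cons hlt]
      simp only [hlt, hs, and_true, dif_pos, List.filter_cons]
      by_cases hn : isNormP (PySem.List.pyGetD chara s "") = true
      · simp only [hn, if_pos]
        rw [loopA0_true_eq chara k (s + 1) (by omega) (by omega), idxsFrom,
          show s + 1 - 1 = s from by ring]
      · simp only [hn, Bool.false_eq_true, if_false]
        rw [ih (s + 1) (by omega) (by omega), idxsFrom]
    · simp only [hlt, false_and, dif_neg, not_false_iff]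
      rw [PySem.List.pyRange_one_eq_nil (by omega)]
      rfl

-- A's backward d==1 loop = last element of the norm-index list up to s (or -1)
theorem loopA1_eq (chara : List String) :
    ∀ (k : Nat) (s : Int), (s + 1).toNat ≤ k → s < (chara.length : Int) →
      loopA1 chara s =
        (((PySem.List.pyRange 0 (s + 1) 1).filter
            (fun i => isNormP (PySem.List.pyGetD chara i ""))).getLast?.getD (-1)) := by
  intro k
  induction k with
  | zero =>
    intro s hk hs
    have hneg : ¬ 0 ≤ s := by omega
    rw [loopA1]
    simp only [hneg, false_and, dif_neg, not_false_iff]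
    rw [PySem.List.pyRange_one_eq_nil (by omega : s + 1 ≤ 0)]
    rfl
  | succ k ih =>
    intro s hk hs
    rw [loopA1]
    by_cases hnn : 0 ≤ s
    · simp only [hnn, hs, and_true, dif_pos]
      rw [PySem.List.pyRange_one_succ_right (by omega : (0:Int) ≤ s), List.filter_append]
      by_cases hn : isNormP (PySem.List.pyGetD chara s "") = true
      · simp [hn]
      · simp only [hn, List.filter_cons, List.filter_nil, Bool.false_eq_true,
          if_false, List.append_nil]
        have := ih (s - 1) (by omega) (by omega)
        simpa [hn] using this
    · simp only [hnn, false_and, dif_neg, not_false_iff]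
      rw [PySem.List.pyRange_one_eq_nil (by omega : s + 1 ≤ 0)]
      rfl

-- ===== VERDICT (by name: the statement is the Claim_ definition above) =====
theorem findNorm_spec : Claim_equal_findNorm := by
  intro chara start d _ hpre
  unfold Spec_findNorm findNorm findNorm_alt
  have hcong : ∀ (l : List Int),
      l.filter (fun i => PySem.List.pyGetD (chara.map isNormP) i false) =
      l.filter (fun i => isNormP (PySem.List.pyGetD chara i "")) := by
    intro l; exact List.filter_congr (fun x _ => normAt_eq chara x)
  rcases hpre with h0 | h1
  · subst h0
    rw [if_pos rfl, if_pos rfl]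
    by_cases hout : start < 0 ∨ start ≥ (chara.length : Int)
    · rw [loopA0, dif_neg (by omega : ¬ (start < (chara.length : Int) ∧ 0 ≤ start)),
        if_pos hout]
      rfl
    · rw [loopA0_false_eq chara ((chara.length : Int) - start).toNat start (le_refl _) (by omega),
        if_neg hout, hcong]
      rfl
  · subst h1
    rw [if_neg (by decide : ¬ (1:Int) = 0), if_neg (by decide : ¬ (1:Int) = 0),
      if_pos rfl, if_pos rfl]
    by_cases hout : start < 0 ∨ start ≥ (chara.length : Int)
    · rw [loopA1, dif_neg (by omega : ¬ (0 ≤ start ∧ start < (chara.length : Int))),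
        if_pos hout]
    · rw [loopA1_eq chara (start + 1).toNat start (le_refl _) (by omega),
        if_neg hout, hcong]
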